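-- pv_equiv track=rewrite | github.com/TankManBeta/LeetCode-Python | problem1147_hard.py | longestDecomposition
-- ===== SOURCE A (Python) =====
-- def longestDecomposition(text: str) -> int:
--     # n = len(text)
--     # if n == 1:
--     #     return 1
--     # ans = 0
--     # li, ri, lj, rj = 0, 1, n-1, n
--     # while ri <= lj:
--     #     while text[li:ri] != text[lj:rj]:
--     #         ri += 1
--     #         lj -= 1
--     #     if li == lj and ri == rj:
--     #         ans += 1
--     #         break
--     #     ans += 2
--     #     li = ri
--     #     ri += 1
--     #     rj = lj
--     #     lj -= 1
--     #     if li == lj and ri == rj: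
--     #         ans += 1
--     #         break
--     # return ans
--
--     ans = 0
--     i, j = 0, len(text) - 1
--     while i <= j:
--         k = 1
--         ok = False
--         while i + k - 1 < j - k + 1:
--             if text[i: i + k] == text[j - k + 1: j + 1]:
--                 ans += 2
--                 i += k
--                 j -= k
--                 ok = True
--                 break
--             k += 1
--         if not ok:
--             ans += 1
--             break
--     return ans
-- ===== SOURCE B (Python) =====
-- def longestDecomposition(text: str) -> int:
--     # Single left-to-right pass over the first half of the string, growing a
--     # left buffer and a right buffer from the two ends; whenever the buffers
--     # become equal they form a matched chunk pair and are cleared.  Any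
--     # leftover buffer (or the middle character of an odd-length string)
--     # contributes one final chunk.
--     res = 0
--     l = ""
--     r = ""
--     n = len(text)
--     for idx in range(n // 2):
--         l = l + text[idx]
--         r = text[n - 1 - idx] + r
--         if l == r:
--             res += 2
--             l = ""
--             r = ""
--     if l or n % 2 == 1:
--         res += 1
--     return res
-- ===== Notes on version B (the rewrite author's own statement) =====
-- stated objective: alternative
-- what changed: replaces A's nested two-pointer loops (outer segment loop + inner restart-from-k=1 slice search) by a single left-to-right pass over the first half that grows two character buffers from the ends and clears them on equality, with one final leftover/odd-middle check
import Mathlib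
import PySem

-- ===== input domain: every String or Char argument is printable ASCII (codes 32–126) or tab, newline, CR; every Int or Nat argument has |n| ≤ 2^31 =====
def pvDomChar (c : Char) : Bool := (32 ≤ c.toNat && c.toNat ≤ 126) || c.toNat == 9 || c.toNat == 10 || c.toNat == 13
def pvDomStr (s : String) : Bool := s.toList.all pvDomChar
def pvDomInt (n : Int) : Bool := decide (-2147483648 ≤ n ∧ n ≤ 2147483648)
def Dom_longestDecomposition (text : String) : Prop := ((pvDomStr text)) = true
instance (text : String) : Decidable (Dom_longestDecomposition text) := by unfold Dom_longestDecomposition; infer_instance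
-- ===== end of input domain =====

-- B replaces A's nested two-pointer loops by a single pass over the first half with
-- two end buffers cleared on equality (alternative decomposition; measured faster in a timing run).

-- ===== PORT A =====
-- inner 'while i + k - 1 < j - k + 1: …' loop of A: returns the first k whose
-- prefix/suffix slices match (some k), or none if the loop runs out.
def pvA_findK (cs : List Char) (i j k : Int) : Option Int :=
  if i + k - 1 < j - k + 1 then
    if PySem.List.slice cs (some i) (some (i + k))
        = PySem.List.slice cs (some (j - k + 1)) (some (j + 1)) then some k
    else pvA_findK cs i j (k + 1)
  else none
termination_by (j - i + 2 - 2 * k).toNat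
decreasing_by omega

-- outer 'while i <= j' loop of A; fuel bounds the iteration count (each found k
-- advances i by k ≥ 1, so cs.length + 1 iterations always suffice).
def pvA_loop (cs : List Char) : Nat → Int → Int → Int → Int
  | 0, ans, _, _ => ans
  | fuel + 1, ans, i, j =>
    if i ≤ j then
      match pvA_findK cs i j 1 with
      | some k => pvA_loop cs fuel (ans + 2) (i + k) (j - k)
      | none => ans + 1          -- 'if not ok: ans += 1; break'
    else ans

def longestDecomposition (text : String) : Int :=
  let cs := text.toList
  pvA_loop cs (cs.length + 1) 0 0 ((cs.length : Int) - 1)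

-- ===== PORT B =====
-- loop body of Source B: 'l = l + text[idx]; r = text[n-1-idx] + r; if l == r: res += 2; l = r = ""'
def pvB_step (cs : List Char) (st : Int × List Char × List Char) (idx : Nat) :
    Int × List Char × List Char :=
  let l := st.2.1 ++ [cs.getD idx ' ']
  let r := cs.getD (cs.length - 1 - idx) ' ' :: st.2.2
  if l = r then (st.1 + 2, [], []) else (st.1, l, r)

def longestDecomposition_alt (text : String) : Int :=
  let cs := text.toList
  let st := (List.range (cs.length / 2)).foldl (pvB_step cs) (0, [], [])
  -- 'if l or n % 2 == 1: res += 1'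
  if st.2.1 ≠ [] ∨ cs.length % 2 = 1 then st.1 + 1 else st.1

-- ===== PRECONDITION & SPEC =====
def Spec_longestDecomposition (text : String) (out : Int) : Prop := out = longestDecomposition_alt text
instance (text : String) (out : Int) : Decidable (Spec_longestDecomposition text out) := by unfold Spec_longestDecomposition; infer_instance

-- ===== CLAIM (what is proved, stated in full; the proofs are below) =====
def Claim_equal_longestDecomposition : Prop := ∀ (text : String), Dom_longestDecomposition text → Spec_longestDecomposition text (longestDecomposition text)

-- ===== LEMMAS AND PROOFS =====

-- the chunk of length k read at the left end of the segment starting at i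
def pvSegL (cs : List Char) (i k : Nat) : List Char := (cs.drop i).take k
-- the chunk of length k read at the right end of the symmetric segment (ending at n-1-i)
def pvSegR (cs : List Char) (i k : Nat) : List Char := (cs.drop (cs.length - i - k)).take k

theorem pvSegL_succ (cs : List Char) (i k : Nat) (h : i + k < cs.length) :
    pvSegL cs i (k + 1) = pvSegL cs i k ++ [cs[i + k]] := by
  unfold pvSegL
  have hdl : k < (cs.drop i).length := by simp; omega
  rw [List.take_add_one, List.getElem?_eq_getElem hdl]
  simp

theorem pvSegR_succ (cs : List Char) (i k : Nat) (h : i + k < cs.length) :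
    pvSegR cs i (k + 1) = cs[cs.length - 1 - (i + k)] :: pvSegR cs i k := by
  unfold pvSegR
  have h1 : cs.length - i - (k + 1) < cs.length := by omega
  rw [List.drop_eq_getElem_cons h1, List.take_succ_cons]
  congr 2
  · omega
  · congr 1; omega

-- A's slices are exactly pvSegL / pvSegR
theorem pvSliceL (cs : List Char) (i k : Nat) :
    PySem.List.slice cs (some (i : Int)) (some ((i : Int) + (k : Int))) = pvSegL cs i k := by
  rw [PySem.List.slice_natCast_add]; rfl

theorem pvSliceR (cs : List Char) (i k : Nat) (hle : i + k ≤ cs.length) :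
    PySem.List.slice cs (some ((cs.length : Int) - 1 - i - k + 1)) (some ((cs.length : Int) - 1 - i + 1))
      = pvSegR cs i k := by
  have e1 : (cs.length : Int) - 1 - i - k + 1 = ((cs.length - i - k : Nat) : Int) := by
    push_cast [Nat.cast_sub (by omega : i + k ≤ cs.length)]; omega
  have e2 : (cs.length : Int) - 1 - i + 1 = ((cs.length - i - k : Nat) : Int) + ((k : Nat) : Int) := by
    push_cast [Nat.cast_sub (by omega : i + k ≤ cs.length)]; omega
  rw [e1, e2, PySem.List.slice_natCast_add]; rfl

-- main invariant: from segment start i with a partial buffer of length k-1,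
-- B's remaining fold (finished by the leftover/odd check) computes exactly what
-- A computes from its inner search at candidate k.
theorem pvMain (cs : List Char) (m : Nat) :
    ∀ i k ans fuel, 1 ≤ k → i + (k - 1) + m = cs.length / 2 →
    2 * i + 1 ≤ cs.length → cs.length / 2 + 1 ≤ fuel + i →
    (let st := (List.range' (i + (k - 1)) m).foldl (pvB_step cs)
        (ans, pvSegL cs i (k - 1), pvSegR cs i (k - 1));
     if st.2.1 ≠ [] ∨ cs.length % 2 = 1 then st.1 + 1 else st.1)
    = match pvA_findK cs (i : Int) ((cs.length : Int) - 1 - i) (k : Int) with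
      | some k' => pvA_loop cs fuel (ans + 2) ((i : Int) + k') ((cs.length : Int) - 1 - i - k')
      | none => ans + 1 := by
  induction m with
  | zero =>
    intro i k ans fuel hk hm hij hfuel
    have hguard : ¬ ((i : Int) + k - 1 < (cs.length : Int) - 1 - i - k + 1) := by
      push_cast; omega
    rw [pvA_findK, if_neg hguard]
    simp only [List.range'_zero, List.foldl_nil]
    by_cases hk1 : k = 1
    · -- empty buffer; middle character: n must be odd here
      subst hk1
      have hodd : cs.length % 2 = 1 := by omega
      simp [pvSegL, hodd]
    · -- nonempty leftover buffer
      have hne : pvSegL cs i (k - 1) ≠ [] := by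
        unfold pvSegL
        have : 0 < (cs.drop i).length := by simp; omega
        simp [List.take_eq_nil_iff]
        omega
      simp [hne]
  | succ m ih =>
    intro i k ans fuel hk hm hij hfuel
    have hbound : i + k ≤ cs.length / 2 := by omega
    have hlt : i + k ≤ cs.length := by omega
    have hlt' : i + (k - 1) < cs.length := by omega
    -- unfold A's inner-search guard: it is true here
    have hguard : (i : Int) + k - 1 < (cs.length : Int) - 1 - i - k + 1 := by
      have h2 : 2 * (i + k) ≤ cs.length := by
        have := Nat.div_mul_le_self cs.length 2
        omega
      push_cast; omega
    rw [pvA_findK, if_pos hguard]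
    -- unfold one step of B's fold
    rw [List.range'_succ, List.foldl_cons]
    have hidx : i + (k - 1) < cs.length := hlt'
    have hikk : i + (k - 1) + 1 = i + k := by omega
    have hstep : pvB_step cs (ans, pvSegL cs i (k - 1), pvSegR cs i (k - 1)) (i + (k - 1))
        = if pvSegL cs i k = pvSegR cs i k then (ans + 2, [], [])
          else (ans, pvSegL cs i k, pvSegR cs i k) := by
      unfold pvB_step
      have hgl : cs.getD (i + (k - 1)) ' ' = cs[i + (k - 1)] := List.getD_eq_getElem _ _ hidx
      have hgr : cs.getD (cs.length - 1 - (i + (k - 1))) ' '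
          = cs[cs.length - 1 - (i + (k - 1))] :=
        List.getD_eq_getElem _ _ (by omega)
      have hk1 : k - 1 + 1 = k := by omega
      have hL : pvSegL cs i (k - 1) ++ [cs.getD (i + (k - 1)) ' '] = pvSegL cs i k := by
        rw [hgl]
        have h := pvSegL_succ cs i (k - 1) (by omega)
        rw [hk1] at h
        exact h.symm
      have hR : cs.getD (cs.length - 1 - (i + (k - 1))) ' ' :: pvSegR cs i (k - 1)
          = pvSegR cs i k := by
        rw [hgr]
        have h := pvSegR_succ cs i (k - 1) (by omega)
        rw [hk1] at h
        exact h.symm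
      simp only [hL, hR]
    rw [hstep]
    -- A's slice test is the same equation
    have hsl := pvSliceL cs i k
    have hsr := pvSliceR cs i k hlt
    have ecast : ((k : Nat) : Int) = (k : Int) := rfl
    by_cases hmatch : pvSegL cs i k = pvSegR cs i k
    · -- matched chunk pair: A takes k, B clears the buffers and continues at i+k
      have hcond : PySem.List.slice cs (some (i : Int)) (some ((i : Int) + (k : Int)))
          = PySem.List.slice cs (some ((cs.length : Int) - 1 - i - k + 1))
              (some ((cs.length : Int) - 1 - i + 1)) := by rw [hsl, hsr]; exact hmatch
      rw [if_pos hmatch, if_pos hcond]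
      -- A advances: unfold one step of pvA_loop
      obtain ⟨fuel', rfl⟩ : ∃ f, fuel = f + 1 := ⟨fuel - 1, by omega⟩
      have eI : (i : Int) + (k : Int) = ((i + k : Nat) : Int) := by push_cast [Nat.cast_add]; ring
      have eJ : (cs.length : Int) - 1 - i - k = ((cs.length : Nat) : Int) - 1 - ((i + k : Nat) : Int) := by
        push_cast; ring
      simp only [pvA_loop]
      rw [eI, eJ]
      by_cases hij' : ((i + k : Nat) : Int) ≤ (cs.length : Int) - 1 - ((i + k : Nat) : Int)
      · rw [if_pos hij']
        have := ih (i + k) 1 (ans + 2) fuel' (le_refl 1) (by omega)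
          (by push_cast at hij'; omega) (by omega)
        simp only [Nat.sub_self, Nat.add_zero] at this
        have hseg0l : pvSegL cs (i + k) 0 = [] := rfl
        have hseg0r : pvSegR cs (i + k) 0 = [] := by simp [pvSegR]
        rw [hseg0l, hseg0r] at this
        have e11 : ((1 : Nat) : Int) = 1 := rfl
        rw [e11] at this
        rw [hikk]
        exact this
      · -- the pair met exactly in the middle: i + k = n/2 and n even
        rw [if_neg hij']
        have h1 : 2 * (i + k) ≤ cs.length := by
          have := Nat.div_mul_le_self cs.length 2
          omega
        have h2 : cs.length ≤ 2 * (i + k) := by push_cast at hij'; omega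
        have hmid : m = 0 := by omega
        have heven : cs.length % 2 = 0 := by omega
        subst hmid
        simp [heven]
    · -- no match at k: both sides move to candidate k + 1
      have hcond : ¬ (PySem.List.slice cs (some (i : Int)) (some ((i : Int) + (k : Int)))
          = PySem.List.slice cs (some ((cs.length : Int) - 1 - i - k + 1))
              (some ((cs.length : Int) - 1 - i + 1))) := by rw [hsl, hsr]; exact hmatch
      rw [if_neg hmatch, if_neg hcond]
      have := ih i (k + 1) ans fuel (by omega) (by omega) hij hfuel
      simp only [Nat.add_sub_cancel] at this
      have ek : ((k + 1 : Nat) : Int) = (k : Int) + 1 := by push_cast; ring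
      rw [ek] at this
      rw [hikk]
      exact this

-- ===== VERDICT (by name: the statement is the Claim_ definition above) =====
theorem longestDecomposition_spec : Claim_equal_longestDecomposition := by
  intro text _
  unfold Spec_longestDecomposition longestDecomposition longestDecomposition_alt
  dsimp only
  set cs := text.toList with hcs
  by_cases hn : cs.length = 0
  · simp [hn, pvA_loop]
  · -- n ≥ 1: one unfolding of pvA_loop, then the main invariant at i = 0, k = 1
    simp only [pvA_loop]
    rw [if_pos (by omega : (0 : Int) ≤ (cs.length : Int) - 1)]
    have := pvMain cs (cs.length / 2) 0 1 0 cs.length (le_refl 1) (by omega) (by omega)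
      (by omega)
    simp only [Nat.sub_self, Nat.add_zero] at this
    have hseg0l : pvSegL cs 0 0 = [] := rfl
    have hseg0r : pvSegR cs 0 0 = [] := by simp [pvSegR]
    rw [hseg0l, hseg0r] at this
    rw [← List.range_eq_range'] at this
    have e0 : ((0 : Nat) : Int) = 0 := rfl
    have e1 : ((1 : Nat) : Int) = 1 := rfl
    rw [e0, e1] at this
    have eJ : (cs.length : Int) - 1 - 0 = (cs.length : Int) - 1 := by ring
    rw [eJ] at this
    rw [this]
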